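-- pv_equiv track=rewrite | github.com/Thoufeek9495/RoyalWinAI_Predictor | predictor.py | simulate_entropy
-- ===== SOURCE A (Python) =====
-- def classify_odd_even(num):
--     return "Odd" if num % 2 != 0 else "Even"
--
-- def simulate_entropy(data):
--     if len(data) < 10:
--         return "Even", 50
--     chunks = [data[i:i+5] for i in range(len(data) - 4)]
--     odd_runs = sum(1 for chunk in chunks if all(classify_odd_even(x) == "Odd" for x in chunk))
--     even_runs = sum(1 for chunk in chunks if all(classify_odd_even(x) == "Even" for x in chunk))
--     if odd_runs > even_runs:
--         return "Even", 55
--     elif even_runs > odd_runs: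
--         return "Odd", 55
--     return classify_odd_even(data[-1]), 50
-- ===== SOURCE B (Python) =====
-- def simulate_entropy(data):
--     if len(data) < 10:
--         return "Even", 50
--     odd_runs = even_runs = 0
--     i, n = 0, len(data)
--     while i < n:
--         p = data[i] % 2 != 0
--         j = i + 1
--         while j < n and (data[j] % 2 != 0) == p:
--             j += 1
--         if j - i >= 5:
--             if p:
--                 odd_runs += j - i - 4
--             else:
--                 even_runs += j - i - 4
--         i = j
--     if odd_runs > even_runs:
--         return "Even", 55
--     if even_runs > odd_runs:
--         return "Odd", 55
--     return ("Odd" if data[-1] % 2 != 0 else "Even"), 50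
-- ===== Notes on version B (the rewrite author's own statement) =====
-- stated objective: faster
-- what changed: B replaces building every length-5 window and rescanning each (O(5n) slices plus two full passes over the chunk list) with a single run-length pass: each maximal same-parity run of length L contributes max(0, L-4) windows to that parity's count.
import Mathlib
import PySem

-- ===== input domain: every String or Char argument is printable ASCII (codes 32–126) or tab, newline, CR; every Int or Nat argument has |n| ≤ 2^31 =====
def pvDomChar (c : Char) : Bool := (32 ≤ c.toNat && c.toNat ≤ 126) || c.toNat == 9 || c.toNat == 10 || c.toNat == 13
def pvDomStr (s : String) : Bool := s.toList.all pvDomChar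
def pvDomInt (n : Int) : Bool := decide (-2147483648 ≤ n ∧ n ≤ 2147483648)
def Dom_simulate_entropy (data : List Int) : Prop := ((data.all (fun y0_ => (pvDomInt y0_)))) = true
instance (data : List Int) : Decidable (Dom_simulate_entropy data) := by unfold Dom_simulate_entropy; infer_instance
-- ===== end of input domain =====

-- B replaces A's per-window rescans (build every length-5 slice, scan the slice list twice)
-- with a single run-length pass: each maximal same-parity run of length L contributes
-- max(0, L-4) windows to that parity's count. Same return value on every input.

-- ===== PORT A =====
def classify_odd_even (num : Int) : String :=
  if PySem.Int.mod num 2 ≠ 0 then "Odd" else "Even"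

def simulate_entropy (data : List Int) : String × Int :=
  if data.length < 10 then ("Even", 50)
  else
    let chunks := (PySem.List.pyRange 0 ((data.length : Int) - 4) 1).map
      (fun i => PySem.List.slice data (some i) (some (i + 5)))
    let odd_runs := chunks.countP (fun chunk => chunk.all (fun x => classify_odd_even x == "Odd"))
    let even_runs := chunks.countP (fun chunk => chunk.all (fun x => classify_odd_even x == "Even"))
    if odd_runs > even_runs then ("Even", 55)
    else if even_runs > odd_runs then ("Odd", 55)
    -- data[-1]: the guard guarantees data ≠ [], so Python never raises; pyGetD is exact here
    else (classify_odd_even (PySem.List.pyGetD data (-1) 0), 50)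

-- ===== PORT B =====
def pOdd (x : Int) : Bool := PySem.Int.mod x 2 != 0

-- the outer while loop of Source B: each step consumes one maximal same-parity run
-- (the inner scanning while loop = takeWhile/dropWhile on the suffix)
def runCounts (xs : List Int) (oc ec : Int) : Int × Int :=
  match xs with
  | [] => (oc, ec)
  | x :: rest =>
    let p := pOdd x
    let run := List.takeWhile (fun y => pOdd y == p) rest
    let rest2 := List.dropWhile (fun y => pOdd y == p) rest
    let L : Int := (run.length : Int) + 1
    if L ≥ 5 then
      if p then runCounts rest2 (oc + (L - 4)) ec
      else runCounts rest2 oc (ec + (L - 4))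
    else runCounts rest2 oc ec
termination_by xs.length
decreasing_by all_goals
  simp only [List.length_cons]
  exact Nat.lt_succ_of_le (List.length_dropWhile_le _ _)

def simulate_entropy_alt (data : List Int) : String × Int :=
  if data.length < 10 then ("Even", 50)
  else
    let (oc, ec) := runCounts data 0 0
    if oc > ec then ("Even", 55)
    else if ec > oc then ("Odd", 55)
    -- data[-1]: the guard guarantees data ≠ [], so Python never raises; pyGetD is exact here
    else ((if pOdd (PySem.List.pyGetD data (-1) 0) then "Odd" else "Even"), 50)

-- ===== PRECONDITION & SPEC =====
def Spec_simulate_entropy (data : List Int) (out : String × Int) : Prop := out = simulate_entropy_alt data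
instance (data : List Int) (out : String × Int) : Decidable (Spec_simulate_entropy data out) := by unfold Spec_simulate_entropy; infer_instance

-- ===== CLAIM (what is proved, stated in full; the proofs are below) =====
def Claim_equal_simulate_entropy : Prop := ∀ (data : List Int), Dom_simulate_entropy data → Spec_simulate_entropy data (simulate_entropy data)

-- ===== LEMMAS AND PROOFS =====

-- number of length-5 windows of xs all of whose elements satisfy p (A's count, in drop/take form)
def cnt (p : Int → Bool) (xs : List Int) : Nat :=
  (List.range (xs.length - 4)).countP (fun k => ((xs.drop k).take 5).all p)

lemma classify_eq (x : Int) : classify_odd_even x = if pOdd x then "Odd" else "Even" := by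
  simp [classify_odd_even, pOdd]

lemma pred_odd : (fun x => classify_odd_even x == "Odd") = pOdd := by
  funext x; by_cases h : pOdd x <;> simp [classify_eq, h]

lemma pred_even : (fun x => classify_odd_even x == "Even") = (fun x => !pOdd x) := by
  funext x; by_cases h : pOdd x <;> simp [classify_eq, h]

-- A's chunk count, reduced to cnt
lemma A_count (p : Int → Bool) (data : List Int) :
    ((PySem.List.pyRange 0 ((data.length : Int) - 4) 1).map
      (fun i => PySem.List.slice data (some i) (some (i + 5)))).countP (fun c => c.all p)
    = cnt p data := by
  rw [PySem.List.pyRange_one]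
  simp only [List.map_map, List.countP_map, Int.sub_zero, cnt]
  have h4 : (((data.length : Int) - 4)).toNat = data.length - 4 := by omega
  rw [h4]
  apply List.countP_congr
  intro k hk
  simp only [Function.comp]
  have h1 : (0 : Int) + (k : Int) = ((k : Nat) : Int) := by ring
  have h2 : ((k : Nat) : Int) + 5 = (((k + 5 : Nat)) : Int) := by push_cast; ring
  rw [h1, h2, PySem.List.slice_natCast]
  simp

-- peel one element off the front of the window count
lemma cnt_cons (p : Int → Bool) (x : Int) (xs : List Int) :
    cnt p (x :: xs)
      = (if 5 ≤ xs.length + 1 ∧ ((x :: xs).take 5).all p then 1 else 0) + cnt p xs := by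
  by_cases h : 4 ≤ xs.length
  · have hl : (x :: xs).length - 4 = (xs.length - 4) + 1 := by simp; omega
    rw [cnt, cnt, hl, List.range_succ_eq_map, List.countP_cons, List.countP_map]
    simp only [Function.comp_def, Nat.succ_eq_add_one, List.drop_succ_cons, List.drop_zero]
    by_cases hall : ((x :: xs).take 5).all p = true
    · rw [if_pos hall, if_pos (⟨by omega, hall⟩ : 5 ≤ xs.length + 1 ∧ _)]; omega
    · rw [if_neg hall, if_neg (fun hc => hall hc.2)]; omega
  · have hb : xs.length - 4 = 0 := by omega
    have hc : xs.length - 3 = 0 := by omega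
    simp [cnt, hb, hc, h]

-- a maximal p-run of length L at the front contributes L - 4 windows (Nat subtraction = max(0,·))
lemma cnt_run_same (p : Int → Bool) (run rest : List Int)
    (hrun : ∀ y ∈ run, p y = true) (hrest : ∀ y ∈ rest.take 1, p y = false) :
    cnt p (run ++ rest) = (run.length - 4) + cnt p rest := by
  induction run with
  | nil => simp
  | cons r run ih =>
    rw [List.cons_append, cnt_cons,
      ih (fun y hy => hrun y (List.mem_cons_of_mem r hy))]
    have hcond : (5 ≤ (run ++ rest).length + 1 ∧ ((r :: (run ++ rest)).take 5).all p) ↔ 4 ≤ run.length := by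
      constructor
      · rintro ⟨hlen, hall⟩
        by_contra hlt
        have hlt' : run.length < 4 := by omega
        -- rest is nonempty and its head sits inside the take-5 window
        have hrest_ne : rest ≠ [] := by
          intro he; subst he; simp at hlen; omega
        obtain ⟨h0, t, he⟩ := List.exists_cons_of_ne_nil hrest_ne
        have hph : p h0 = false := hrest h0 (by simp [he])
        have hmem : h0 ∈ (r :: (run ++ rest)).take 5 := by
          subst he
          rw [List.take_cons (by omega), List.take_append]
          have hm : h0 ∈ List.take (4 - run.length) (h0 :: t) := by
            cases hk : 4 - run.length with
            | zero => omega
            | succ m => simp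
          simp [hm]
        have := List.all_eq_true.mp hall h0 hmem
        rw [hph] at this; exact absurd this (by simp)
      · intro h4
        constructor
        · simp; omega
        · rw [List.take_cons (by omega), List.take_append]
          have hz : 4 - run.length = 0 := by omega
          rw [hz]
          simp only [List.take_zero, List.append_nil]
          rw [List.all_eq_true]
          intro y hy
          rcases List.mem_cons.mp hy with h | h
          · exact h ▸ hrun r (by simp)
          · exact hrun y (List.mem_cons_of_mem r (List.mem_of_mem_take h))
    split_ifs with hif
    · have := hcond.mp hif; simp; omega
    · have : ¬ 4 ≤ run.length := fun h4 => hif (hcond.mpr h4)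
      simp; omega

-- a front run whose elements all fail p contributes nothing
lemma cnt_run_other (p : Int → Bool) (run rest : List Int)
    (hrun : ∀ y ∈ run, p y = false) :
    cnt p (run ++ rest) = cnt p rest := by
  induction run with
  | nil => simp
  | cons r run ih =>
    rw [List.cons_append, cnt_cons, ih (fun y hy => hrun y (List.mem_cons_of_mem r hy))]
    have hn : ¬ (5 ≤ (run ++ rest).length + 1 ∧ ((r :: (run ++ rest)).take 5).all p) := by
      rintro ⟨-, hall⟩
      have hm : r ∈ (r :: (run ++ rest)).take 5 := by simp
      have := List.all_eq_true.mp hall r hm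
      rw [hrun r (by simp)] at this; exact absurd this (by simp)
    rw [if_neg hn]; simp

-- the head element of dropWhile fails the predicate (stated over take 1 to cover the empty case)
lemma take_one_dropWhile (q : Int → Bool) (l : List Int) :
    ∀ y ∈ (l.dropWhile q).take 1, q y = false := by
  intro y hy
  cases h : l.dropWhile q with
  | nil => rw [h] at hy; simp at hy
  | cons a t =>
    rw [h] at hy
    simp only [List.take_succ_cons, List.take_zero, List.mem_singleton] at hy
    subst hy
    have hl : 0 < (l.dropWhile q).length := by rw [h]; simp
    have := List.dropWhile_get_zero_not q l hl
    simpa [h] using Bool.not_eq_true _ ▸ (by simpa [h] using this)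

-- B's run-length pass computes exactly A's two window counts
lemma runCounts_eq (xs : List Int) (oc ec : Int) :
    runCounts xs oc ec = (oc + (cnt pOdd xs : Int), ec + (cnt (fun x => !pOdd x) xs : Int)) := by
  induction xs, oc, ec using runCounts.induct with
  | case1 oc ec => simp [runCounts, cnt]
  | case2 oc ec x rest p run rest2 L hL0 hp0 ih0 =>
    have hp : pOdd x = true := hp0
    have hL : ((rest.takeWhile (fun y => pOdd y == pOdd x)).length : Int) + 1 ≥ 5 := hL0
    have ih : runCounts (rest.dropWhile (fun y => pOdd y == pOdd x))
        (oc + (((rest.takeWhile (fun y => pOdd y == pOdd x)).length : Int) + 1 - 4)) ec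
        = (oc + (((rest.takeWhile (fun y => pOdd y == pOdd x)).length : Int) + 1 - 4)
            + (cnt pOdd (rest.dropWhile (fun y => pOdd y == pOdd x)) : Int),
           ec + (cnt (fun x => !pOdd x) (rest.dropWhile (fun y => pOdd y == pOdd x)) : Int)) := ih0
    simp only [runCounts]
    rw [if_pos hL, if_pos hp, ih]
    have hsplit : x :: rest = (x :: rest.takeWhile (fun y => pOdd y == pOdd x)) ++ rest.dropWhile (fun y => pOdd y == pOdd x) := by
      rw [List.cons_append, List.takeWhile_append_dropWhile]
    have hrun : ∀ y ∈ x :: rest.takeWhile (fun y => pOdd y == pOdd x), pOdd y = true := by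
      intro y hy
      rcases List.mem_cons.mp hy with h | h
      · rw [h]; exact hp
      · have := List.mem_takeWhile_imp h
        simp at this; rw [this]; exact hp
    have hrest : ∀ y ∈ ((rest.dropWhile (fun y => pOdd y == pOdd x)).take 1), pOdd y = false := by
      intro y hy
      have := take_one_dropWhile (fun y => pOdd y == pOdd x) rest y hy
      simp [hp] at this; exact this
    have hodd : cnt pOdd (x :: rest)
        = ((rest.takeWhile (fun y => pOdd y == pOdd x)).length + 1 - 4)
          + cnt pOdd (rest.dropWhile (fun y => pOdd y == pOdd x)) := by
      rw [hsplit, cnt_run_same pOdd _ _ hrun hrest]; simp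
    have heven : cnt (fun x => !pOdd x) (x :: rest)
        = cnt (fun x => !pOdd x) (rest.dropWhile (fun y => pOdd y == pOdd x)) := by
      rw [hsplit, cnt_run_other]
      intro y hy; simp [hrun y hy]
    rw [hodd, heven]
    clear hL0 ih0
    have h4 : 4 ≤ (List.takeWhile (fun y => pOdd y == pOdd x) rest).length + 1 := by omega
    simp only [Prod.mk.injEq]
    constructor
    · rw [Nat.cast_add, Nat.cast_sub h4]; push_cast; ring
    · trivial
  | case3 oc ec x rest p run rest2 L hL0 hp0 ih0 =>
    have hp' : pOdd x = false := by
      have : ¬ pOdd x = true := hp0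
      simpa using this
    have hL : ((rest.takeWhile (fun y => pOdd y == pOdd x)).length : Int) + 1 ≥ 5 := hL0
    have ih : runCounts (rest.dropWhile (fun y => pOdd y == pOdd x)) oc
        (ec + (((rest.takeWhile (fun y => pOdd y == pOdd x)).length : Int) + 1 - 4))
        = (oc + (cnt pOdd (rest.dropWhile (fun y => pOdd y == pOdd x)) : Int),
           ec + (((rest.takeWhile (fun y => pOdd y == pOdd x)).length : Int) + 1 - 4)
            + (cnt (fun x => !pOdd x) (rest.dropWhile (fun y => pOdd y == pOdd x)) : Int)) := ih0
    have hpn : ¬ pOdd x = true := hp0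
    simp only [runCounts]
    rw [if_pos hL, if_neg hpn, ih]
    have hsplit : x :: rest = (x :: rest.takeWhile (fun y => pOdd y == pOdd x)) ++ rest.dropWhile (fun y => pOdd y == pOdd x) := by
      rw [List.cons_append, List.takeWhile_append_dropWhile]
    have hrun : ∀ y ∈ x :: rest.takeWhile (fun y => pOdd y == pOdd x), pOdd y = false := by
      intro y hy
      rcases List.mem_cons.mp hy with h | h
      · rw [h]; exact hp'
      · have := List.mem_takeWhile_imp h
        simp at this; rw [this]; exact hp'
    have hrest : ∀ y ∈ ((rest.dropWhile (fun y => pOdd y == pOdd x)).take 1), (fun x => !pOdd x) y = false := by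
      intro y hy
      have := take_one_dropWhile (fun y => pOdd y == pOdd x) rest y hy
      simp [hp'] at this; simp [this]
    have heven : cnt (fun x => !pOdd x) (x :: rest)
        = ((rest.takeWhile (fun y => pOdd y == pOdd x)).length + 1 - 4)
          + cnt (fun x => !pOdd x) (rest.dropWhile (fun y => pOdd y == pOdd x)) := by
      rw [hsplit, cnt_run_same _ _ _ (by intro y hy; simp [hrun y hy]) hrest]; simp
    have hodd : cnt pOdd (x :: rest)
        = cnt pOdd (rest.dropWhile (fun y => pOdd y == pOdd x)) := by
      rw [hsplit, cnt_run_other _ _ _ hrun]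
    rw [hodd, heven]
    clear hL0 ih0
    have h4 : 4 ≤ (List.takeWhile (fun y => pOdd y == pOdd x) rest).length + 1 := by omega
    simp only [Prod.mk.injEq]
    constructor
    · trivial
    · rw [Nat.cast_add, Nat.cast_sub h4]; push_cast; ring
  | case4 oc ec x rest p run rest2 L hL0 ih0 =>
    have hL : ¬ ((rest.takeWhile (fun y => pOdd y == pOdd x)).length : Int) + 1 ≥ 5 := hL0
    have ih : runCounts (rest.dropWhile (fun y => pOdd y == pOdd x)) oc ec
        = (oc + (cnt pOdd (rest.dropWhile (fun y => pOdd y == pOdd x)) : Int),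
           ec + (cnt (fun x => !pOdd x) (rest.dropWhile (fun y => pOdd y == pOdd x)) : Int)) := ih0
    simp only [runCounts]
    rw [if_neg hL, ih]
    have hshort : (rest.takeWhile (fun y => pOdd y == pOdd x)).length + 1 - 4 = 0 := by omega
    have hsplit : x :: rest = (x :: rest.takeWhile (fun y => pOdd y == pOdd x)) ++ rest.dropWhile (fun y => pOdd y == pOdd x) := by
      rw [List.cons_append, List.takeWhile_append_dropWhile]
    by_cases hp : pOdd x = true
    · have hrun : ∀ y ∈ x :: rest.takeWhile (fun y => pOdd y == pOdd x), pOdd y = true := by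
        intro y hy
        rcases List.mem_cons.mp hy with h | h
        · rw [h]; exact hp
        · have := List.mem_takeWhile_imp h
          simp at this; rw [this]; exact hp
      have hrest : ∀ y ∈ ((rest.dropWhile (fun y => pOdd y == pOdd x)).take 1), pOdd y = false := by
        intro y hy
        have := take_one_dropWhile (fun y => pOdd y == pOdd x) rest y hy
        simp [hp] at this; exact this
      have hodd : cnt pOdd (x :: rest)
          = cnt pOdd (rest.dropWhile (fun y => pOdd y == pOdd x)) := by
        rw [hsplit, cnt_run_same pOdd _ _ hrun hrest]
        simp [hshort]
      have heven : cnt (fun x => !pOdd x) (x :: rest)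
          = cnt (fun x => !pOdd x) (rest.dropWhile (fun y => pOdd y == pOdd x)) := by
        rw [hsplit, cnt_run_other]
        intro y hy; simp [hrun y hy]
      rw [hodd, heven]
    · have hp' : pOdd x = false := by simpa using hp
      have hrun : ∀ y ∈ x :: rest.takeWhile (fun y => pOdd y == pOdd x), pOdd y = false := by
        intro y hy
        rcases List.mem_cons.mp hy with h | h
        · rw [h]; exact hp'
        · have := List.mem_takeWhile_imp h
          simp at this; rw [this]; exact hp'
      have hrest : ∀ y ∈ ((rest.dropWhile (fun y => pOdd y == pOdd x)).take 1), (fun x => !pOdd x) y = false := by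
        intro y hy
        have := take_one_dropWhile (fun y => pOdd y == pOdd x) rest y hy
        simp [hp'] at this; simp [this]
      have heven : cnt (fun x => !pOdd x) (x :: rest)
          = cnt (fun x => !pOdd x) (rest.dropWhile (fun y => pOdd y == pOdd x)) := by
        rw [hsplit, cnt_run_same _ _ _ (by intro y hy; simp [hrun y hy]) hrest]
        simp [hshort]
      have hodd : cnt pOdd (x :: rest)
          = cnt pOdd (rest.dropWhile (fun y => pOdd y == pOdd x)) := by
        rw [hsplit, cnt_run_other _ _ _ hrun]
      rw [hodd, heven]

-- ===== VERDICT (by name: the statement is the Claim_ definition above) =====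
theorem simulate_entropy_spec : Claim_equal_simulate_entropy := by
  intro data _hdom
  unfold Spec_simulate_entropy simulate_entropy simulate_entropy_alt
  by_cases h10 : data.length < 10
  · simp [h10]
  · simp only [if_neg h10]
    rw [pred_odd, pred_even, A_count, A_count, runCounts_eq]
    simp only [Int.zero_add]
    simp only [gt_iff_lt, Nat.cast_lt]
    split_ifs <;> simp_all [classify_eq]
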